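-- pv_equiv track=rewrite | github.com/t1jsh111/2IMA15 | backend/graph_generator.py | create_expanding_graph
-- ===== SOURCE A (Python) =====
-- def create_expanding_graph(number_of_faces):
--     number_of_segments = number_of_faces+1
--
--     last_right_coordinate = (1, 0)
--     last_left_coordinate = (-1, 0)
--     vertices = [last_right_coordinate, last_left_coordinate]
--     segments = [[last_left_coordinate, last_right_coordinate]]
--
--     for i in range(number_of_segments-1):
--         new_left_coordinate = (last_left_coordinate[0] - 1, last_left_coordinate[1] + 1)
--         new_right_coordinate = (last_right_coordinate[0]+1, last_right_coordinate[1]+1)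
--         vertices.append(new_left_coordinate)
--         vertices.append(new_right_coordinate)
--
--         vertices.append(new_left_coordinate)
--         vertices.append(new_right_coordinate)
--
--         segments.append([new_left_coordinate, new_right_coordinate])
--         segments.append([last_left_coordinate, new_left_coordinate])
--         segments.append([last_right_coordinate, new_right_coordinate])
--
--         last_right_coordinate = new_right_coordinate
--         last_left_coordinate = new_left_coordinate
--     return vertices, segments
-- ===== SOURCE B (Python) =====
-- def create_expanding_graph(number_of_faces):
--     # Closed form: level k (k >= 1) has left vertex (-1-k, k) and right vertex (1+k, k).
--     left = lambda k: (-1 - k, k)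
--     right = lambda k: (1 + k, k)
--     vertices = [(1, 0), (-1, 0)] + [
--         p for k in range(1, number_of_faces + 1)
--         for p in (left(k), right(k), left(k), right(k))
--     ]
--     segments = [[(-1, 0), (1, 0)]] + [
--         s for k in range(1, number_of_faces + 1)
--         for s in ([left(k), right(k)],
--                   [left(k - 1), left(k)],
--                   [right(k - 1), right(k)])
--     ]
--     return vertices, segments
-- ===== Notes on version B (the rewrite author's own statement) =====
-- stated objective: simpler
-- what changed: Replaced the single loop threading last_left/last_right accumulator state with a closed-form coordinate formula (level k has left (-1-k,k), right (1+k,k)) and two independent comprehensions building vertices and segments directly from the level index.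
import Mathlib
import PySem

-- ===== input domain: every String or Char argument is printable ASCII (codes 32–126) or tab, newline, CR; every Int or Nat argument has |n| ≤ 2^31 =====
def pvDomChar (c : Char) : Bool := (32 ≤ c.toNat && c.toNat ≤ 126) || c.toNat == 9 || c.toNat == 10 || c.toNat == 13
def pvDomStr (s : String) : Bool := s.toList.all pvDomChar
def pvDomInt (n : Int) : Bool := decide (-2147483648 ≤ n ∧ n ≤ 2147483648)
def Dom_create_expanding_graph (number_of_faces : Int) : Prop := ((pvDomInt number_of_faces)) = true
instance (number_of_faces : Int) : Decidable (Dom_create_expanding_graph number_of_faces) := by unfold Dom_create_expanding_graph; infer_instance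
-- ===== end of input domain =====

-- B replaces A's threaded last_left/last_right loop state with a closed-form
-- per-level coordinate formula and two independent comprehensions (simpler).

-- ===== PORT A =====
-- state: (last_left, last_right, vertices, segments), threaded through the loop
def create_expanding_graph (number_of_faces : Int) : (List (Int × Int)) × (List (List (Int × Int))) :=
  let number_of_segments := number_of_faces + 1
  let last_right : Int × Int := (1, 0)
  let last_left : Int × Int := (-1, 0)
  let vertices : List (Int × Int) := [last_right, last_left]
  let segments : List (List (Int × Int)) := [[last_left, last_right]]
  let st := (PySem.List.pyRange 0 (number_of_segments - 1) 1).foldl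
    (fun st _ =>
      let lastL := st.1
      let lastR := st.2.1
      let vs := st.2.2.1
      let ss := st.2.2.2
      let newL : Int × Int := (lastL.1 - 1, lastL.2 + 1)
      let newR : Int × Int := (lastR.1 + 1, lastR.2 + 1)
      (newL, newR,
       vs ++ [newL, newR, newL, newR],
       ss ++ [[newL, newR], [lastL, newL], [lastR, newR]]))
    (last_left, last_right, vertices, segments)
  (st.2.2.1, st.2.2.2)

-- ===== PORT B =====
def pvLeft (k : Int) : Int × Int := (-1 - k, k)
def pvRight (k : Int) : Int × Int := (1 + k, k)

def create_expanding_graph_alt (number_of_faces : Int) : (List (Int × Int)) × (List (List (Int × Int))) :=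
  let vertices : List (Int × Int) :=
    [(1, 0), (-1, 0)] ++
      (PySem.List.pyRange 1 (number_of_faces + 1) 1).flatMap
        (fun k => [pvLeft k, pvRight k, pvLeft k, pvRight k])
  let segments : List (List (Int × Int)) :=
    [[(-1, 0), (1, 0)]] ++
      (PySem.List.pyRange 1 (number_of_faces + 1) 1).flatMap
        (fun k => [[pvLeft k, pvRight k],
                   [pvLeft (k - 1), pvLeft k],
                   [pvRight (k - 1), pvRight k]])
  (vertices, segments)

-- ===== PRECONDITION & SPEC =====
def Spec_create_expanding_graph (number_of_faces : Int) (out : (List (Int × Int)) × (List (List (Int × Int)))) : Prop := out = create_expanding_graph_alt number_of_faces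
instance (number_of_faces : Int) (out : (List (Int × Int)) × (List (List (Int × Int)))) : Decidable (Spec_create_expanding_graph number_of_faces out) := by unfold Spec_create_expanding_graph; infer_instance

-- ===== CLAIM (what is proved, stated in full; the proofs are below) =====
def Claim_equal_create_expanding_graph : Prop := ∀ (number_of_faces : Int), Dom_create_expanding_graph number_of_faces → Spec_create_expanding_graph number_of_faces (create_expanding_graph number_of_faces)

-- ===== LEMMAS AND PROOFS =====

-- A's loop body, named for the proofs
def pvBody (st : (Int × Int) × (Int × Int) × List (Int × Int) × List (List (Int × Int)))
    : (Int × Int) × (Int × Int) × List (Int × Int) × List (List (Int × Int)) :=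
  let lastL := st.1
  let lastR := st.2.1
  let vs := st.2.2.1
  let ss := st.2.2.2
  let newL : Int × Int := (lastL.1 - 1, lastL.2 + 1)
  let newR : Int × Int := (lastR.1 + 1, lastR.2 + 1)
  (newL, newR,
   vs ++ [newL, newR, newL, newR],
   ss ++ [[newL, newR], [lastL, newL], [lastR, newR]])

-- the body ignores the list element, so the foldl only counts iterations
lemma foldl_const_body (l : List Int)
    (st : (Int × Int) × (Int × Int) × List (Int × Int) × List (List (Int × Int))) :
    l.foldl (fun st _ => pvBody st) st = pvBody^[l.length] st := by
  induction l generalizing st with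
  | nil => rfl
  | cons x xs ih => simp [List.foldl_cons, ih, Function.iterate_succ_apply]

-- iterating the body m times from the level-j state yields the closed forms
lemma iterate_body (m : Nat) : ∀ (j : Int) (V : List (Int × Int)) (S : List (List (Int × Int))),
    pvBody^[m] (pvLeft j, pvRight j, V, S) =
      (pvLeft (j + m), pvRight (j + m),
       V ++ (PySem.List.pyRange (j + 1) (j + 1 + m) 1).flatMap
              (fun k => [pvLeft k, pvRight k, pvLeft k, pvRight k]),
       S ++ (PySem.List.pyRange (j + 1) (j + 1 + m) 1).flatMap
              (fun k => [[pvLeft k, pvRight k],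
                         [pvLeft (k - 1), pvLeft k],
                         [pvRight (k - 1), pvRight k]])) := by
  induction m with
  | zero =>
    intro j V S
    simp [PySem.List.pyRange_one_eq_nil (le_refl (j + 1))]
  | succ m ih =>
    intro j V S
    rw [Function.iterate_succ_apply]
    have hb : pvBody (pvLeft j, pvRight j, V, S) =
        (pvLeft (j + 1), pvRight (j + 1),
         V ++ [pvLeft (j+1), pvRight (j+1), pvLeft (j+1), pvRight (j+1)],
         S ++ [[pvLeft (j+1), pvRight (j+1)], [pvLeft j, pvLeft (j+1)], [pvRight j, pvRight (j+1)]]) := by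
      simp [pvBody, pvLeft, pvRight, sub_sub, add_assoc]
    rw [hb, ih (j + 1)]
    have hr : PySem.List.pyRange (j + 1) (j + 1 + (m + 1 : Nat)) 1 =
        (j + 1) :: PySem.List.pyRange (j + 1 + 1) (j + 1 + 1 + m) 1 := by
      rw [PySem.List.pyRange_one_cons (by push_cast; omega)]
      congr 1; push_cast; ring
    rw [hr]
    have hc : j + 1 + (m : Int) = j + ((m + 1 : Nat) : Int) := by push_cast; ring
    have hd : j + 1 - 1 = j := by omega
    simp only [hc, hd, List.flatMap_cons, List.append_assoc]

lemma pvLeft0 : pvLeft 0 = (-1, 0) := rfl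
lemma pvRight0 : pvRight 0 = (1, 0) := rfl

lemma main_eq (n : Int) : create_expanding_graph n = create_expanding_graph_alt n := by
  have key : create_expanding_graph n =
      (((PySem.List.pyRange 0 (n + 1 - 1) 1).foldl (fun st _ => pvBody st)
          (pvLeft 0, pvRight 0, [pvRight 0, pvLeft 0], [[pvLeft 0, pvRight 0]])).2.2.1,
       ((PySem.List.pyRange 0 (n + 1 - 1) 1).foldl (fun st _ => pvBody st)
          (pvLeft 0, pvRight 0, [pvRight 0, pvLeft 0], [[pvLeft 0, pvRight 0]])).2.2.2) := rfl
  rw [key, foldl_const_body]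
  unfold create_expanding_graph_alt
  by_cases h : n ≤ 0
  · rw [PySem.List.pyRange_one_eq_nil (by omega : n + 1 - 1 ≤ 0),
        PySem.List.pyRange_one_eq_nil (by omega : n + 1 ≤ 1)]
    rfl
  · have hlen : (PySem.List.pyRange 0 (n + 1 - 1) 1).length = n.toNat := by
      rw [PySem.List.length_pyRange_one]; omega
    rw [hlen, iterate_body]
    simp only [zero_add, pvLeft0, pvRight0]
    rw [show (1 : Int) + (n.toNat : Int) = n + 1 by omega]

-- ===== VERDICT (by name: the statement is the Claim_ definition above) =====
theorem create_expanding_graph_spec : Claim_equal_create_expanding_graph := by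
  intro n _
  unfold Spec_create_expanding_graph
  exact main_eq n
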